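-- pv_equiv track=rewrite | github.com/andrelac963/Projeto-Euler-LP | euler.py | count_multiples
-- ===== SOURCE A (Python) =====
-- primes = [2, 3, 5, 7, 11, 13, 17, 19, 23, 29, 31, 37, 41, 43, 47, 53, 59, 61, 67, 71, 73, 79, 83, 89, 97]
--
-- N = 10**16
--
-- def count_multiples(n, min_index, current_product):
--     # Função recursiva para contar quantos números são divisíveis por um produto de 'n' primos distintos.
--     # - n: número de primos a serem usados no produto
--     # - min_index: índice mínimo na lista de primos para começar a considerar
--     # - current_product: produto atual dos primos selecionados
--     if n == 0:
--         # Se não precisamos mais selecionar primos, retornamos quantos múltiplos existem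
--         return N // current_product
--
--     total = 0
--     # Iterar sobre os primos começando do índice mínimo
--     for i in range(min_index, len(primes) - n + 1):
--         next_product = current_product * primes[i]
--         if next_product > N:
--             # Se o próximo produto exceder N, paramos a busca
--             break
--         # Adiciona à contagem o resultado da chamada recursiva
--         total += count_multiples(n - 1, i + 1, next_product)
--
--     return total
-- ===== SOURCE B (Python) =====
-- import itertools
-- import math
--
-- primes = [2, 3, 5, 7, 11, 13, 17, 19, 23, 29, 31, 37, 41, 43, 47, 53, 59, 61, 67, 71, 73, 79, 83, 89, 97]
--
-- N = 10**16
--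
-- def count_multiples(n, min_index, current_product):
--     # Flat enumeration instead of recursion: every size-n combination of the
--     # primes at index >= min_index contributes N // (current_product * prod),
--     # counted only while the product does not exceed N.
--     sub = primes[min_index:]
--     if n > len(sub):
--         return 0
--     total = 0
--     for combo in itertools.combinations(sub, n):
--         p = current_product * math.prod(combo)
--         if p <= N:
--             total += N // p
--     return total
-- ===== Notes on version B (the rewrite author's own statement) =====
-- stated objective: idiomatic
-- what changed: Replaces the recursive backtracking over prime indices (with its break-based pruning) by a flat itertools.combinations enumeration: each size-n combination of primes[min_index:] contributes N // (current_product * prod) when that product is at most N.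
-- outside the precondition, e.g. on count_multiples(1, -2, 1): A returns 18243624344555651, B returns 215452334066951; on count_multiples(-1, 40, 1): A returns 0, B raises ValueError
import Mathlib
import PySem

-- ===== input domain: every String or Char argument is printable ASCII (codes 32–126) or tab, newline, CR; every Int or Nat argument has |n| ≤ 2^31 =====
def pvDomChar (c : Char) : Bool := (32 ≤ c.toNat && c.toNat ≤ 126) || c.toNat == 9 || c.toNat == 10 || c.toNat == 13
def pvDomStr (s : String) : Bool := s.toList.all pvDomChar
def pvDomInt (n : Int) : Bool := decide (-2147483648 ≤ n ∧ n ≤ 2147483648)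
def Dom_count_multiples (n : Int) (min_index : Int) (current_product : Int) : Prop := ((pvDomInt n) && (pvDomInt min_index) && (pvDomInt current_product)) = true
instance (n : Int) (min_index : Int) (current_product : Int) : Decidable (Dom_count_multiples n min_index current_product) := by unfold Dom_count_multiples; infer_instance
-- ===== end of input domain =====

-- B replaces A's recursive backtracking over prime indices by a flat enumeration of
-- size-n combinations of primes[min_index:], summing guarded contributions (idiomatic, not faster).


-- ===== PORT A =====
-- module constants
def pvPrimes : List Int := [2, 3, 5, 7, 11, 13, 17, 19, 23, 29, 31, 37, 41, 43, 47, 53, 59, 61, 67, 71, 73, 79, 83, 89, 97]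
def pvN : Int := 10000000000000000

-- the 'for i in range(…): … break …' loop of A; g is the recursive call on (i+1, next_product).
-- primes[i] is ported as pyGetD with default 0: inside Pre_ every visited index is in range, so the default is never read.
def pvLoopA (g : Int → Int → Int) (cp : Int) : List Int → Int → Int
  | [], total => total
  | i :: rest, total =>
    let np := cp * PySem.List.pyGetD pvPrimes i 0
    if np > pvN then total
    else pvLoopA g cp rest (total + g (i + 1) np)

-- A's recursion, with n as the (decreasing) fuel; inside Pre_ (0 ≤ n) this is exactly A's recursion on n.
def pvCmA : Nat → Int → Int → Int
  | 0, _, cp => PySem.Int.floordiv pvN cp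
  | Nat.succ f, min_index, cp =>
    pvLoopA (fun mi np => pvCmA f mi np) cp
      (PySem.List.pyRange min_index (25 - ((f : Int) + 1) + 1) 1) 0

def count_multiples (n : Int) (min_index : Int) (current_product : Int) : Int :=
  pvCmA n.toNat min_index current_product

-- ===== PORT B =====
-- itertools.combinations(primes[min_index:], n) is ported as List.sublistsLen (order of the
-- combinations does not affect the accumulated sum); math.prod is List.prod.
def count_multiples_alt (n : Int) (min_index : Int) (current_product : Int) : Int :=
  let sub := PySem.List.slice pvPrimes (some min_index) none
  if (sub.length : Int) < n then 0
  else
    (List.sublistsLen n.toNat sub).foldl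
      (fun total combo =>
        let p := current_product * combo.prod
        if p ≤ pvN then total + PySem.Int.floordiv pvN p else total) 0

-- ===== PRECONDITION & SPEC =====
-- Pre_ excludes: negative n and min_index < -25 (A eventually reads an out-of-range prime index:
-- IndexError) and current_product = 0 reaching the n == 0 base case (ZeroDivisionError); and two
-- unspecified corners on which A still returns: negative min_index with 0 < n < 26 - min_index,
-- where A's value comes from negative-index wraparound while B's slice reads a suffix, and
-- negative n with an overshooting min_index, where A returns 0 from an empty range while B's
-- combinations raises ValueError.
def Pre_count_multiples (n : Int) (min_index : Int) (current_product : Int) : Prop :=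
  0 ≤ n ∧ (0 ≤ min_index ∨ n = 0 ∨ 26 - n ≤ min_index) ∧
    (current_product ≠ 0 ∨ (0 < n ∧ 26 - n ≤ min_index))
instance (n : Int) (min_index : Int) (current_product : Int) : Decidable (Pre_count_multiples n min_index current_product) := by unfold Pre_count_multiples; infer_instance

def pvWitness_count_multiples : Int × Int × Int := (2, 0, 1)

def Spec_count_multiples (n : Int) (min_index : Int) (current_product : Int) (out : Int) : Prop := out = count_multiples_alt n min_index current_product
instance (n : Int) (min_index : Int) (current_product : Int) (out : Int) : Decidable (Spec_count_multiples n min_index current_product out) := by unfold Spec_count_multiples; infer_instance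

-- ===== CLAIM (what is proved, stated in full; the proofs are below) =====
def Claim_equal_count_multiples : Prop := ∀ (n : Int) (min_index : Int) (current_product : Int), Dom_count_multiples n min_index current_product → Pre_count_multiples n min_index current_product → Spec_count_multiples n min_index current_product (count_multiples n min_index current_product)

-- ===== LEMMAS AND PROOFS =====

-- contribution of one combination, and B's sum over all size-f combinations of primes[mi:]
def pvContrib (cp : Int) (c : List Int) : Int :=
  if cp * c.prod ≤ pvN then PySem.Int.floordiv pvN (cp * c.prod) else 0

def pvSum (f : Nat) (mi : Nat) (cp : Int) : Int :=
  (((pvPrimes.drop mi).sublistsLen f).map (pvContrib cp)).sum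

-- B's foldl is the sum of the guarded contributions
theorem pvFoldl_eq_sum (cp : Int) (l : List (List Int)) (t : Int) :
    l.foldl (fun total combo =>
      let p := cp * combo.prod
      if p ≤ pvN then total + PySem.Int.floordiv pvN p else total) t
      = t + (l.map (pvContrib cp)).sum := by
  induction l generalizing t with
  | nil => simp
  | cons c l ih =>
    simp only [List.foldl_cons, List.map_cons, List.sum_cons, pvContrib]
    split_ifs with h <;> rw [ih] <;> ring

-- A's loop accumulates on top of its start value
theorem pvLoopA_acc (g : Int → Int → Int) (cp : Int) (l : List Int) (t : Int) :
    pvLoopA g cp l t = t + pvLoopA g cp l 0 := by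
  induction l generalizing t with
  | nil => simp [pvLoopA]
  | cons i rest ih =>
    simp only [pvLoopA]
    split_ifs with h
    · omega
    · rw [ih, ih (0 + _)]; ring

-- the primes list: every element of a suffix is ≥ its head and ≥ 2
theorem pvPrimes_suffix_ge : ∀ mi : Nat, mi < 25 →
    ∀ x ∈ pvPrimes.drop mi, pvPrimes.getD mi 0 ≤ x ∧ 2 ≤ x := by decide

theorem pvPrimes_getD_ge_two : ∀ mi : Nat, mi < 25 → 2 ≤ pvPrimes.getD mi 0 := by decide

theorem pvOne_le_prod : ∀ c : List Int, (∀ x ∈ c, 2 ≤ x) → 1 ≤ c.prod := by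
  intro c
  induction c with
  | nil => simp
  | cons a t ih =>
    intro h
    have ha : 2 ≤ a := h a (by simp)
    have ht : 1 ≤ t.prod := ih (fun x hx => h x (by simp [hx]))
    simp only [List.prod_cons]
    nlinarith

theorem pvProd_lower (q : Int) : ∀ c : List Int, c ≠ [] → (∀ x ∈ c, q ≤ x ∧ 2 ≤ x) → q ≤ c.prod := by
  intro c hne h
  match c with
  | a :: t =>
    have ha := h a (by simp)
    have ht : 1 ≤ t.prod := pvOne_le_prod t (fun x hx => (h x (by simp [hx])).2)
    simp only [List.prod_cons]
    nlinarith [ha.1, ha.2]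

-- vanishing: once cp * primes[mi] exceeds N (cp > 0), every size-(f+1) combination of primes[mi:]
-- has product above N, so B's sum is 0
theorem pvSum_vanish (f : Nat) (mi : Nat) (cp : Int) (hmi : mi < 25) (hcp : 0 < cp)
    (hbig : pvN < cp * pvPrimes.getD mi 0) : pvSum (f + 1) mi cp = 0 := by
  apply List.sum_eq_zero
  intro x hx
  obtain ⟨c, hc, rfl⟩ := List.mem_map.mp hx
  obtain ⟨hsub, hlen⟩ := List.mem_sublistsLen.mp hc
  have hne : c ≠ [] := by intro h; rw [h] at hlen; simp at hlen
  have hall : ∀ y ∈ c, pvPrimes.getD mi 0 ≤ y ∧ 2 ≤ y :=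
    fun y hy => pvPrimes_suffix_ge mi hmi y (hsub.subset hy)
  have hq : pvPrimes.getD mi 0 ≤ c.prod := pvProd_lower _ c hne hall
  have : pvN < cp * c.prod := by
    calc pvN < cp * pvPrimes.getD mi 0 := hbig
    _ ≤ cp * c.prod := by exact mul_le_mul_of_nonneg_left hq (le_of_lt hcp)
  simp [pvContrib, not_le.mpr this]

-- empty cases of pvSum
theorem pvSum_zero (mi : Nat) (cp : Int) :
    pvSum 0 mi cp = if cp ≤ pvN then PySem.Int.floordiv pvN cp else 0 := by
  simp [pvSum, List.sublistsLen_zero, pvContrib]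

theorem pvSum_short (f : Nat) (mi : Nat) (cp : Int) (h : (pvPrimes.drop mi).length < f) :
    pvSum f mi cp = 0 := by
  simp [pvSum, List.sublistsLen_of_length_lt h]

-- splitting off the first index of the suffix
theorem pvSum_succ (f : Nat) (mi : Nat) (cp : Int) (h : mi < 25) :
    pvSum (f + 1) mi cp
      = pvSum (f + 1) (mi + 1) cp + pvSum f (mi + 1) (cp * pvPrimes.getD mi 0) := by
  have hlen : mi < pvPrimes.length := by simpa [pvPrimes] using h
  have hdrop : pvPrimes.drop mi = pvPrimes[mi] :: pvPrimes.drop (mi + 1) :=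
    (List.getElem_cons_drop hlen).symm
  have hgetD : pvPrimes.getD mi 0 = pvPrimes[mi] := List.getD_eq_getElem _ _ hlen
  rw [pvSum, hdrop, List.sublistsLen_succ_cons, List.map_append, List.sum_append]
  congr 1
  rw [List.map_map]
  have : (pvContrib cp ∘ List.cons pvPrimes[mi]) = pvContrib (cp * pvPrimes.getD mi 0) := by
    funext c
    simp [pvContrib, mul_assoc, List.getD, List.getElem?_eq_getElem hlen]
  rw [this]
  rfl

theorem pvFdiv_big (cp : Int) (h : pvN < cp) : PySem.Int.floordiv pvN cp = 0 := by
  have hpos : 0 < cp := lt_trans (by norm_num [pvN]) h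
  rw [PySem.Int.floordiv_eq_iff_of_pos hpos]
  constructor
  · simp [pvN]
  · simpa using h

theorem pvMain : ∀ f j : Nat, ∀ mi cp : Int, 0 ≤ mi → 25 ≤ mi + j →
    (cp ≠ 0 ∨ (0 < f ∧ 26 - (f : Int) ≤ mi)) →
    pvCmA f mi cp = pvSum f mi.toNat cp := by
  intro f
  induction f with
  | zero =>
    intro j mi cp _ _ hpre
    have hcp : cp ≠ 0 := by rcases hpre with h | h; exact h; omega
    rw [pvSum_zero]
    show PySem.Int.floordiv pvN cp = _
    split_ifs with h
    · rfl
    · exact pvFdiv_big cp (by omega)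
  | succ f ihf =>
    intro j
    induction j with
    | zero =>
      intro mi cp h0 hj _
      have hge : (25 : Int) - ((f : Int) + 1) + 1 ≤ mi := by omega
      have hrange : PySem.List.pyRange mi (25 - ((f : Int) + 1) + 1) 1 = [] := by
        simp [PySem.List.pyRange]; omega
      have hdrop : pvPrimes.drop mi.toNat = [] := by
        apply List.drop_eq_nil_of_le
        simp [pvPrimes]; omega
      rw [show pvCmA (f + 1) mi cp = pvLoopA (fun mi np => pvCmA f mi np) cp
            (PySem.List.pyRange mi (25 - ((f : Int) + 1) + 1) 1) 0 from rfl,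
          hrange]
      rw [pvSum, hdrop, List.sublistsLen_of_length_lt (by simp)]
      rfl
    | succ j ihj =>
      intro mi cp h0 hj hpre
      by_cases h25 : (25 : Int) ≤ mi
      · exact ihj mi cp h0 (by omega) hpre
      -- mi < 25
      by_cases hr : (25 : Int) - (f : Int) ≤ mi
      · -- range empty, and the suffix is too short for f+1 primes
        have hrange : PySem.List.pyRange mi (25 - ((f : Int) + 1) + 1) 1 = [] := by
          simp [PySem.List.pyRange]; omega
        rw [show pvCmA (f + 1) mi cp = pvLoopA (fun mi np => pvCmA f mi np) cp
              (PySem.List.pyRange mi (25 - ((f : Int) + 1) + 1) 1) 0 from rfl,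
            hrange]
        rw [pvSum_short (f + 1) mi.toNat cp (by simp [pvPrimes]; omega)]
        rfl
      -- nonempty range: mi < 25 - f, hence cp ≠ 0
      have hcp : cp ≠ 0 := by rcases hpre with h | h; exact h; omega
      have hmi25 : mi.toNat < 25 := by omega
      have hlen : mi.toNat < pvPrimes.length := by simp [pvPrimes]; omega
      have hq2 : 2 ≤ pvPrimes.getD mi.toNat 0 := pvPrimes_getD_ge_two mi.toNat hmi25
      have hcons : PySem.List.pyRange mi (25 - ((f : Int) + 1) + 1) 1
          = mi :: PySem.List.pyRange (mi + 1) (25 - ((f : Int) + 1) + 1) 1 :=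
        PySem.List.pyRange_one_cons (by omega)
      have hget : PySem.List.pyGetD pvPrimes mi 0 = pvPrimes.getD mi.toNat 0 := by
        rw [PySem.List.pyGetD_eq_getElem pvPrimes 0 h0 (by simp [pvPrimes]; omega)]
        exact (List.getD_eq_getElem _ _ hlen).symm
      set q := pvPrimes.getD mi.toNat 0 with hqdef
      rw [show pvCmA (f + 1) mi cp = pvLoopA (fun mi np => pvCmA f mi np) cp
            (PySem.List.pyRange mi (25 - ((f : Int) + 1) + 1) 1) 0 from rfl,
          hcons]
      simp only [pvLoopA, hget]
      by_cases hbig : pvN < cp * q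
      · -- break on the very first index; cp must be positive, so B's whole sum vanishes
        rw [if_pos (by omega)]
        have hcpos : 0 < cp := by
          rcases lt_or_ge 0 cp with h | h
          · exact h
          · exfalso
            have hmul : cp * q ≤ 0 := mul_nonpos_iff.mpr (Or.inr ⟨h, by omega⟩)
            have hN : (0 : Int) < pvN := by norm_num [pvN]
            omega
        exact (pvSum_vanish f mi.toNat cp hmi25 hcpos hbig).symm
      · rw [if_neg (by omega)]
        have hnp : cp * q ≠ 0 := by
          rcases lt_or_gt_of_ne hcp with h | h
          · nlinarith
          · nlinarith
        have hrec1 : pvCmA f (mi + 1) (cp * q) = pvSum f (mi + 1).toNat (cp * q) :=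
          ihf 25 (mi + 1) (cp * q) (by omega) (by omega) (Or.inl hnp)
        have hrec2 : pvCmA (f + 1) (mi + 1) cp = pvSum (f + 1) (mi + 1).toNat cp :=
          ihj (mi + 1) cp (by omega) (by omega) (Or.inl hcp)
        rw [pvLoopA_acc]
        rw [show pvLoopA (fun mi np => pvCmA f mi np) cp
              (PySem.List.pyRange (mi + 1) (25 - ((f : Int) + 1) + 1) 1) 0
            = pvCmA (f + 1) (mi + 1) cp from rfl]
        rw [hrec1, hrec2, pvSum_succ f mi.toNat cp hmi25]
        have ht : (mi + 1).toNat = mi.toNat + 1 := by omega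
        rw [ht]
        ring

-- ===== VERDICT (by name: the statement is the Claim_ definition above) =====
theorem count_multiples_spec : Claim_equal_count_multiples := by
  intro n mi cp hdom hpre
  obtain ⟨hn, hmid, hdisj⟩ := hpre
  unfold Spec_count_multiples count_multiples count_multiples_alt
  by_cases hmi : 0 ≤ mi
  case neg =>
    rcases hmid with h | hn0 | hbig
    · omega
    case inr.inr =>
      -- negative min_index with n ≥ 26 - min_index: A's range and B's combinations are both empty
      have hn27 : 27 ≤ n := by omega
      cases h : n.toNat with
      | zero => omega
      | succ f =>
        have hnf : n = (f : Int) + 1 := by omega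
        have hrange : PySem.List.pyRange mi (25 - ((f : Int) + 1) + 1) 1 = [] := by
          simp [PySem.List.pyRange]; omega
        have hlenp : pvPrimes.length = 25 := by simp [pvPrimes]
        have hlen : ((PySem.List.slice pvPrimes (some mi) none).length : Int) < n := by
          rw [PySem.List.slice_some_none, List.length_drop, hlenp]; omega
        rw [if_pos hlen]
        rw [show pvCmA (f + 1) mi cp = pvLoopA (fun mi np => pvCmA f mi np) cp
              (PySem.List.pyRange mi (25 - ((f : Int) + 1) + 1) 1) 0 from rfl, hrange]
        rfl
    -- n = 0 with a negative min_index: both sides are N // current_product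
    have hcp : cp ≤ 2147483648 := by
      unfold Dom_count_multiples pvDomInt at hdom
      simp only [Bool.and_eq_true, decide_eq_true_eq] at hdom
      exact hdom.2.2
    subst hn0
    rw [if_neg (not_lt.mpr (Int.natCast_nonneg _))]
    show PySem.Int.floordiv pvN cp = _
    rw [show (0 : Int).toNat = 0 from rfl, List.sublistsLen_zero]
    simp only [List.foldl, List.prod_nil, mul_one]
    rw [if_pos (by norm_num [pvN]; omega)]
    omega
  rw [PySem.List.slice_from _ hmi]
  rw [pvMain n.toNat 25 mi cp hmi (by omega)
      (by rcases hdisj with h | h; exact Or.inl h; exact Or.inr (by omega))]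
  by_cases hshort : ((pvPrimes.drop mi.toNat).length : Int) < n
  · rw [if_pos hshort, pvSum_short n.toNat mi.toNat cp (by omega)]
  · rw [if_neg hshort, pvFoldl_eq_sum]
    simp [pvSum]
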